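-- pv_equiv track=rewrite | github.com/hyeonjini/algorithm | book/ch13-BFS_DFS/13-2.py | do_spread
-- ===== SOURCE A (Python) =====
-- from collections import deque
--
-- dx = [-1, 1, 0, 0] # 상, 하, 좌, 우
--
-- dy = [0, 0, -1, 1]
--
-- def do_spread(matrix):
--     n, m = len(matrix), len(matrix[0])
--     for i in range(n):
--         for j in range(m):
--             if matrix[i][j] == 2:
--                 q = deque()
--                 q.append([i, j])
--                 while q:
--                     x, y = q.popleft()
--                     # 상, 하, 좌, 우 탐색
--                     for d in range(4):
--                         nx = x + dx[d]
--                         ny = y + dy[d]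
--
--                         if nx < 0 or ny < 0 or nx >= n or ny >= m:
--                             continue
--                         if matrix[nx][ny] == 0:
--                             matrix[nx][ny] = 2
--                             q.append([nx, ny])
--     return matrix
-- ===== SOURCE B (Python) =====
-- def do_spread(matrix):
--     n, m = len(matrix), len(matrix[0])
--     # fixed-point relaxation: repeatedly sweep the grid, turning any 0 that
--     # touches a 2 into a 2, until a full sweep changes nothing (no queue at all)
--     changed = True
--     while changed:
--         changed = False
--         for i in range(n):
--             for j in range(m):
--                 if matrix[i][j] == 0 and (
--                         (i > 0 and matrix[i - 1][j] == 2) or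
--                         (i + 1 < n and matrix[i + 1][j] == 2) or
--                         (j > 0 and matrix[i][j - 1] == 2) or
--                         (j + 1 < m and matrix[i][j + 1] == 2)):
--                     matrix[i][j] = 2
--                     changed = True
--     return matrix
-- ===== Notes on version B (the rewrite author's own statement) =====
-- stated objective: alternative
-- what changed: A relaunches a fresh single-source BFS with a deque from every 2-cell found during a full grid rescan; B has no queue at all: it repeatedly sweeps the grid turning any 0-cell that touches a 2 into a 2 until one full sweep changes nothing (Gauss-Seidel fixed-point relaxation).
-- outside the precondition, e.g. on do_spread([]): A raises IndexError, B raises IndexError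
import Mathlib
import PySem

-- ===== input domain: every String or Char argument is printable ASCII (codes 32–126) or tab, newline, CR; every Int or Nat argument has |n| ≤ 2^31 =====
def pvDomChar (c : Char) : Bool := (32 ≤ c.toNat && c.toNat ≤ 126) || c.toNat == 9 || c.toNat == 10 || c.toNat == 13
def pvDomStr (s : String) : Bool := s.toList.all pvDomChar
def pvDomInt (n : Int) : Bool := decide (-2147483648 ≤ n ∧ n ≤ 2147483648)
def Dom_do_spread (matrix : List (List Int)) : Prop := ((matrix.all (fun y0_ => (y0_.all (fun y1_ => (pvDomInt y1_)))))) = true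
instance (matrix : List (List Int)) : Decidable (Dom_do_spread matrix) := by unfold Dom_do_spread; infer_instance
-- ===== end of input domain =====

-- B replaces A's per-2-cell relaunched deque BFS (BFS nested inside the double scan) by a queue-free
-- fixed-point relaxation: full grid sweeps that turn 0-cells touching a 2 into 2, repeated until a
-- sweep changes nothing; equivalence is about the returned matrix (both Pythons mutate the argument
-- in place in the same 0→2 direction).


-- ===== PORT A =====
-- matrix[x][y] read / write; all reads and writes both Pythons perform are guarded to be in range
-- on rectangular input (Pre_), where getD/set are exact.
def gget (M : List (List Int)) (x y : Int) : Int := (M.getD x.toNat []).getD y.toNat 0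

def gset (M : List (List Int)) (x y v : Int) : List (List Int) :=
  M.set x.toNat ((M.getD x.toNat []).set y.toNat v)

def dxL : List Int := [-1, 1, 0, 0]

def dyL : List Int := [0, 0, -1, 1]

-- one neighbour test of the loop body 'for d in range(4): …'
def upd (n m : Int) (acc : List (List Int) × List (Int × Int)) (nx ny : Int) :
    List (List Int) × List (Int × Int) :=
  if nx < 0 ∨ ny < 0 ∨ n ≤ nx ∨ m ≤ ny then acc
  else if gget acc.1 nx ny = 0 then (gset acc.1 nx ny 2, acc.2 ++ [(nx, ny)])
  else acc

-- the 'for d in range(4)' scan over the dx/dy offset tables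
def expand (n m : Int) (M : List (List Int)) (x y : Int) :
    List (List Int) × List (Int × Int) :=
  (dxL.zip dyL).foldl (fun acc d => upd n m acc (x + d.1) (y + d.2)) (M, [])

def zcount (M : List (List Int)) : Nat := (M.map (fun r => r.count 0)).sum

-- the 'while q:' loop; the fuel argument is a totality guard only (each pass either pops one
-- element or turns a 0-cell into a 2, so zcount + queue length bounds the number of iterations)
def bfsRun (n m : Int) : Nat → List (List Int) → List (Int × Int) → List (List Int)
  | 0, M, _ => M
  | _ + 1, M, [] => M
  | f + 1, M, c :: q =>
    let s := expand n m M c.1 c.2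
    bfsRun n m f s.1 (q ++ s.2)

def do_spread (matrix : List (List Int)) : List (List Int) :=
  let n : Int := matrix.length
  let m : Int := ((matrix.getD 0 []).length : Int)
  (PySem.List.pyRange 0 n 1).foldl (fun M i =>
    (PySem.List.pyRange 0 m 1).foldl (fun M j =>
      if gget M i j = 2 then bfsRun n m (zcount M + 2) M [(i, j)] else M) M) matrix

-- ===== PORT B =====
-- the body of B's double loop: one cell test of 'matrix[i][j] == 0 and (… neighbour == 2 …)'
def cellStep (n m : Int) (s : List (List Int) × Bool) (i j : Int) :
    List (List Int) × Bool :=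
  if gget s.1 i j = 0 ∧
      ((0 < i ∧ gget s.1 (i - 1) j = 2) ∨ (i + 1 < n ∧ gget s.1 (i + 1) j = 2) ∨
       (0 < j ∧ gget s.1 i (j - 1) = 2) ∨ (j + 1 < m ∧ gget s.1 i (j + 1) = 2))
  then (gset s.1 i j 2, true) else s

-- one full sweep 'for i in range(n): for j in range(m): …' carrying (matrix, changed)
def sweep (n m : Int) (M : List (List Int)) : List (List Int) × Bool :=
  (PySem.List.pyRange 0 n 1).foldl (fun s i =>
    (PySem.List.pyRange 0 m 1).foldl (fun s j => cellStep n m s i j) s) (M, false)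

-- the 'while changed:' loop; fuel is a totality guard only (every changing sweep turns at least
-- one 0 into a 2, so zcount bounds the number of changing sweeps)
def fixLoop (n m : Int) : Nat → List (List Int) → List (List Int)
  | 0, M => M
  | f + 1, M =>
    let s := sweep n m M
    if s.2 then fixLoop n m f s.1 else M

def do_spread_alt (matrix : List (List Int)) : List (List Int) :=
  let n : Int := matrix.length
  let m : Int := ((matrix.getD 0 []).length : Int)
  fixLoop n m (zcount matrix + 1) matrix

-- ===== PRECONDITION & SPEC =====
-- exactly the inputs on which A returns: A raises IndexError on [] and whenever some row is
-- shorter than row 0 (its scan reads matrix[i][j] for every j < len(matrix[0])); columns past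
-- len(matrix[0]) are ignored by both programs.
def Pre_do_spread (matrix : List (List Int)) : Prop :=
  matrix ≠ [] ∧ ∀ r ∈ matrix, (matrix.headD []).length ≤ r.length

instance (matrix : List (List Int)) : Decidable (Pre_do_spread matrix) := by
  unfold Pre_do_spread; infer_instance

def pvWitness_do_spread : List (List Int) := [[2, 0, 1], [0, 1, 0], [0, 0, 0]]

def Spec_do_spread (matrix : List (List Int)) (out : List (List Int)) : Prop := out = do_spread_alt matrix
instance (matrix : List (List Int)) (out : List (List Int)) : Decidable (Spec_do_spread matrix out) := by unfold Spec_do_spread; infer_instance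

-- ===== CLAIM (what is proved, stated in full; the proofs are below) =====
def Claim_equal_do_spread : Prop := ∀ (matrix : List (List Int)), Dom_do_spread matrix → Pre_do_spread matrix → Spec_do_spread matrix (do_spread matrix)

-- ===== LEMMAS AND PROOFS =====

-- (x, y) is inside the N × K grid
def inB (N K : Nat) (x y : Int) : Prop := 0 ≤ x ∧ x < (N : Int) ∧ 0 ≤ y ∧ y < (K : Int)

-- 4-adjacency, exactly the dx/dy offsets
def Adjc (x y nx ny : Int) : Prop :=
  (nx = x + (-1) ∧ ny = y + 0) ∨ (nx = x + 1 ∧ ny = y + 0) ∨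
  (nx = x + 0 ∧ ny = y + (-1)) ∨ (nx = x + 0 ∧ ny = y + 1)

-- cells the flood fill must turn to / keep at 2: original 2-cells and 0-cells reachable from them
inductive Reach (M0 : List (List Int)) (N K : Nat) : Int → Int → Prop
  | seed (x y : Int) : inB N K x y → gget M0 x y = 2 → Reach M0 N K x y
  | step (x y nx ny : Int) : Reach M0 N K x y → Adjc x y nx ny → inB N K nx ny →
      gget M0 nx ny = 0 → Reach M0 N K nx ny

-- the grid has N rows, each of length at least K (columns past K are never touched)
def Dims (N K : Nat) (M : List (List Int)) : Prop :=
  M.length = N ∧ ∀ (i : Nat) (h : i < M.length), K ≤ (M[i]'h).length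

-- soundness: the evolving matrix differs from M0 only by 0-cells of M0 turned to 2, all reachable
def Sound (M0 : List (List Int)) (N K : Nat) (M : List (List Int)) : Prop :=
  ∀ x y : Int, inB N K x y →
    gget M x y = gget M0 x y ∨ (gget M0 x y = 0 ∧ gget M x y = 2 ∧ Reach M0 N K x y)

-- (x, y) is fully expanded: no in-bounds neighbour still holds 0
def Expd (N K : Nat) (M : List (List Int)) (x y : Int) : Prop :=
  ∀ nx ny : Int, Adjc x y nx ny → inB N K nx ny → gget M nx ny ≠ 0

def QOk (N K : Nat) (M : List (List Int)) (q : List (Int × Int)) : Prop :=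
  ∀ c ∈ q, inB N K c.1 c.2 ∧ gget M c.1 c.2 = 2

-- every 2-cell is queued, fully expanded, or an original seed the scan has not reached yet (F)
def Front (M0 : List (List Int)) (N K : Nat) (F : Int → Int → Prop)
    (M : List (List Int)) (q : List (Int × Int)) : Prop :=
  ∀ x y : Int, inB N K x y → gget M x y = 2 →
    (x, y) ∈ q ∨ Expd N K M x y ∨ (gget M0 x y = 2 ∧ F x y)


-- basic bridges --------------------------------------------------------------

theorem gget_eq_getElem (M : List (List Int)) (x y : Int)
    (h1 : x.toNat < M.length) (h2 : y.toNat < (M[x.toNat]'h1).length) :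
    gget M x y = (M[x.toNat]'h1)[y.toNat]'h2 := by
  simp only [gget, List.getD_eq_getElem?_getD]
  rw [List.getElem?_eq_getElem h1]
  simp only [Option.getD_some]
  rw [List.getElem?_eq_getElem h2]
  simp only [Option.getD_some]

theorem dims_bounds (N K : Nat) (M : List (List Int)) (x y : Int)
    (hD : Dims N K M) (hx : inB N K x y) :
    x.toNat < M.length ∧ y.toNat < (M.getD x.toNat []).length := by
  obtain ⟨hlen, hrow⟩ := hD
  obtain ⟨a1, a2, a3, a4⟩ := hx
  have h1 : x.toNat < M.length := by omega
  refine ⟨h1, ?_⟩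
  rw [List.getD_eq_getElem?_getD, List.getElem?_eq_getElem h1]
  simp only [Option.getD_some]
  have := hrow x.toNat h1
  omega

theorem gget_gset (M : List (List Int)) (x y v a b : Int)
    (hx0 : 0 ≤ x) (hy0 : 0 ≤ y) (ha0 : 0 ≤ a) (hb0 : 0 ≤ b)
    (hxl : x.toNat < M.length) (hyl : y.toNat < (M.getD x.toNat []).length) :
    gget (gset M x y v) a b = if a = x ∧ b = y then v else gget M a b := by
  have hyl' : y.toNat < ((M[x.toNat]?).getD []).length := by
    simpa [List.getD_eq_getElem?_getD] using hyl
  simp only [gget, gset, List.getD_eq_getElem?_getD]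
  by_cases hax : a = x
  · subst hax
    rw [List.getElem?_set_self (by simpa using hxl)]
    simp only [Option.getD_some]
    by_cases hby : b = y
    · subst hby
      rw [List.getElem?_set_self (by simpa using hyl')]
      simp
    · rw [List.getElem?_set_ne (by omega : y.toNat ≠ b.toNat)]
      simp [hby]
  · rw [List.getElem?_set_ne (by omega : x.toNat ≠ a.toNat)]
    simp [hax]

theorem gget_gset_self (N K : Nat) (M : List (List Int)) (x y v : Int)
    (hD : Dims N K M) (hx : inB N K x y) :
    gget (gset M x y v) x y = v := by
  obtain ⟨h1, h2⟩ := dims_bounds N K M x y hD hx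
  rw [gget_gset M x y v x y hx.1 hx.2.2.1 hx.1 hx.2.2.1 h1 h2]
  simp

theorem gget_gset_ne (N K : Nat) (M : List (List Int)) (x y v a b : Int)
    (hD : Dims N K M) (hx : inB N K x y)
    (ha0 : 0 ≤ a) (hb0 : 0 ≤ b) (hne : ¬(a = x ∧ b = y)) :
    gget (gset M x y v) a b = gget M a b := by
  obtain ⟨h1, h2⟩ := dims_bounds N K M x y hD hx
  rw [gget_gset M x y v a b hx.1 hx.2.2.1 ha0 hb0 h1 h2]
  simp [hne]

theorem dims_gset (N K : Nat) (M : List (List Int)) (x y v : Int)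
    (hD : Dims N K M) : Dims N K (gset M x y v) := by
  obtain ⟨hlen, hrow⟩ := hD
  refine ⟨by simpa [gset] using hlen, ?_⟩
  intro i h
  unfold gset at h ⊢
  rw [List.getElem_set]
  split
  · next heq =>
    have h1 : x.toNat < M.length := by subst heq; simpa using h
    rw [List.length_set, List.getD_eq_getElem?_getD, List.getElem?_eq_getElem h1]
    simpa using hrow x.toNat h1
  · next hne =>
    exact hrow i (by simpa using h)

theorem count_set_two (r : List Int) : ∀ (j : Nat) (hj : j < r.length),
    r[j] = 0 → (r.set j 2).count 0 + 1 = r.count 0 := by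
  induction r with
  | nil => intro j hj _; simp at hj
  | cons hd tl ih =>
    intro j hj h0
    cases j with
    | zero =>
      simp only [List.getElem_cons_zero] at h0
      subst h0
      simp
    | succ j =>
      simp only [List.set_cons_succ, List.count_cons]
      have := ih j (by simpa using hj) (by simpa using h0)
      omega

theorem sum_set_nat (l : List Nat) : ∀ (i : Nat) (a : Nat) (hi : i < l.length),
    (l.set i a).sum + l[i] = l.sum + a := by
  induction l with
  | nil => intro i a hi; simp at hi
  | cons hd tl ih =>
    intro i a hi
    cases i with
    | zero => simp [List.sum_cons]; omega
    | succ i =>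
      simp only [List.set_cons_succ, List.sum_cons, List.getElem_cons_succ]
      have := ih i a (by simpa using hi)
      omega

theorem zcount_gset (N K : Nat) (M : List (List Int)) (x y : Int)
    (hD : Dims N K M) (hx : inB N K x y) (h0 : gget M x y = 0) :
    zcount M = zcount (gset M x y 2) + 1 := by
  obtain ⟨h1, hyl⟩ := dims_bounds N K M x y hD hx
  have h2 : y.toNat < (M[x.toNat]'h1).length := by
    have := hD.2 x.toNat h1
    have := hx.2.2.2; have := hx.2.2.1; omega
  have hget : (M[x.toNat]'h1)[y.toNat]'h2 = 0 := by
    rw [← gget_eq_getElem M x y h1 h2]; exact h0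
  have hrowD : M.getD x.toNat [] = M[x.toNat]'h1 := by
    rw [List.getD_eq_getElem?_getD, List.getElem?_eq_getElem h1]
    simp only [Option.getD_some]
  unfold zcount gset
  rw [hrowD]
  simp only [List.map_set]
  have hs := sum_set_nat (M.map fun r => r.count 0) x.toNat
    (((M[x.toNat]'h1).set y.toNat 2).count 0) (by simpa using h1)
  simp only [List.getElem_map] at hs
  have hc := count_set_two (M[x.toNat]'h1) y.toNat h2 hget
  omega

theorem reach_inB (M0 : List (List Int)) (N K : Nat) (x y : Int)
    (h : Reach M0 N K x y) : inB N K x y := by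
  cases h with
  | seed _ _ hb _ => exact hb
  | step _ _ _ _ _ _ hb _ => exact hb

theorem adjc_symm (x y nx ny : Int) (h : Adjc x y nx ny) : Adjc nx ny x y := by
  unfold Adjc at *
  omega

-- one neighbour update preserves the invariants ------------------------------

theorem upd_main (M0 : List (List Int)) (N K : Nat) (F : Int → Int → Prop)
    (x y nx ny : Int) (M : List (List Int)) (adds rest : List (Int × Int))
    (hadj : Adjc x y nx ny) (hreach : Reach M0 N K x y)
    (hD : Dims N K M) (hS : Sound M0 N K M)
    (hQ : QOk N K M (rest ++ adds))
    (hFr : ∀ a b : Int, inB N K a b → gget M a b = 2 →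
      (a, b) ∈ rest ++ adds ∨ Expd N K M a b ∨ (gget M0 a b = 2 ∧ F a b) ∨ (a = x ∧ b = y)) :
    Dims N K (upd (N : Int) (K : Int) (M, adds) nx ny).1 ∧
    Sound M0 N K (upd (N : Int) (K : Int) (M, adds) nx ny).1 ∧
    QOk N K (upd (N : Int) (K : Int) (M, adds) nx ny).1
      (rest ++ (upd (N : Int) (K : Int) (M, adds) nx ny).2) ∧
    (∀ a b : Int, inB N K a b → gget (upd (N : Int) (K : Int) (M, adds) nx ny).1 a b = 2 →
      (a, b) ∈ rest ++ (upd (N : Int) (K : Int) (M, adds) nx ny).2 ∨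
      Expd N K (upd (N : Int) (K : Int) (M, adds) nx ny).1 a b ∨
      (gget M0 a b = 2 ∧ F a b) ∨ (a = x ∧ b = y)) ∧
    (inB N K nx ny → gget (upd (N : Int) (K : Int) (M, adds) nx ny).1 nx ny ≠ 0) ∧
    (∀ a b : Int, 0 ≤ a → 0 ≤ b → gget M a b ≠ 0 →
      gget (upd (N : Int) (K : Int) (M, adds) nx ny).1 a b ≠ 0) ∧
    (∀ a b : Int, 0 ≤ a → 0 ≤ b → gget M a b = 2 →
      gget (upd (N : Int) (K : Int) (M, adds) nx ny).1 a b = 2) ∧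
    zcount (upd (N : Int) (K : Int) (M, adds) nx ny).1 +
      (upd (N : Int) (K : Int) (M, adds) nx ny).2.length = zcount M + adds.length := by
  unfold upd
  by_cases hg : nx < 0 ∨ ny < 0 ∨ (N : Int) ≤ nx ∨ (K : Int) ≤ ny
  · simp only [if_pos hg]
    refine ⟨hD, hS, hQ, hFr, ?_, fun _ _ _ _ h => h, fun _ _ _ _ h => h, by trivial⟩
    intro hb; exfalso; unfold inB at hb; omega
  · have hinB : inB N K nx ny := by unfold inB; omega
    simp only [if_neg hg]
    by_cases h0 : gget M nx ny = 0
    · simp only [if_pos h0]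
      have hM0z : gget M0 nx ny = 0 := by
        rcases hS nx ny hinB with h | ⟨_, h2, _⟩
        · rw [← h]; exact h0
        · exact absurd h2 (by rw [h0]; decide)
      have hreach' : Reach M0 N K nx ny := Reach.step x y nx ny hreach hadj hinB hM0z
      have hnn : 0 ≤ nx ∧ 0 ≤ ny := by unfold inB at hinB; omega
      have hself : gget (gset M nx ny 2) nx ny = 2 :=
        gget_gset_self N K M nx ny 2 hD hinB
      have hne : ∀ a b : Int, 0 ≤ a → 0 ≤ b → ¬(a = nx ∧ b = ny) →
          gget (gset M nx ny 2) a b = gget M a b := fun a b ha hb h =>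
        gget_gset_ne N K M nx ny 2 a b hD hinB ha hb h
    
      have hmono2 : ∀ a b : Int, 0 ≤ a → 0 ≤ b → gget M a b = 2 →
          gget (gset M nx ny 2) a b = 2 := by
        intro a b ha hb h2
        by_cases hc : a = nx ∧ b = ny
        · obtain ⟨h1', h2'⟩ := hc; subst h1'; subst h2'; exact hself
        · rw [hne a b ha hb hc]; exact h2
      have hmonoZ : ∀ a b : Int, 0 ≤ a → 0 ≤ b → gget M a b ≠ 0 →
          gget (gset M nx ny 2) a b ≠ 0 := by
        intro a b ha hb h2
        by_cases hc : a = nx ∧ b = ny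
        · obtain ⟨h1', h2'⟩ := hc; subst h1'; subst h2'; rw [hself]; decide
        · rw [hne a b ha hb hc]; exact h2
      have hexpd : ∀ a b : Int, Expd N K M a b → Expd N K (gset M nx ny 2) a b := by
        intro a b he na nb hadj' hb'
        have := he na nb hadj' hb'
        exact hmonoZ na nb (by unfold inB at hb'; omega) (by unfold inB at hb'; omega) this
      refine ⟨dims_gset N K M nx ny 2 hD, ?_, ?_, ?_, ?_, hmonoZ, hmono2, ?_⟩
      · -- Sound
        intro a b hab
        by_cases hc : a = nx ∧ b = ny
        · obtain ⟨h1', h2'⟩ := hc; subst h1'; subst h2'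
          exact Or.inr ⟨hM0z, hself, hreach'⟩
        · rw [hne a b (by unfold inB at hab; omega) (by unfold inB at hab; omega) hc]
          exact hS a b hab
      · -- QOk
        intro c hc
        simp only [List.mem_append, List.mem_singleton] at hc
        rcases hc with hc | hc | hc
        · have := hQ c (by simp [hc])
          exact ⟨this.1, hmono2 c.1 c.2 (by have := this.1; unfold inB at this; omega)
            (by have := this.1; unfold inB at this; omega) this.2⟩
        · have := hQ c (by simp [hc])
          exact ⟨this.1, hmono2 c.1 c.2 (by have := this.1; unfold inB at this; omega)
            (by have := this.1; unfold inB at this; omega) this.2⟩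
        · subst hc; exact ⟨hinB, hself⟩
      · -- Front-with-exception
        intro a b hab h2
        by_cases hc : a = nx ∧ b = ny
        · obtain ⟨h1', h2'⟩ := hc; subst h1'; subst h2'
          left; simp
        · rw [hne a b (by unfold inB at hab; omega) (by unfold inB at hab; omega) hc] at h2
          rcases hFr a b hab h2 with hm | he | hrest | hxy
          · left; simp only [List.mem_append] at hm ⊢; simp only [List.mem_singleton]; tauto
          · right; left; exact hexpd a b he
          · right; right; left; exact hrest
          · right; right; right; exact hxy
      · -- target nonzero
        intro _; rw [hself]; decide
      · -- zcount
        have := zcount_gset N K M nx ny hD hinB h0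
        simp only [List.length_append, List.length_singleton]
        omega
    · simp only [if_neg h0]
      exact ⟨hD, hS, hQ, hFr, fun _ => h0, fun _ _ _ _ h => h, fun _ _ _ _ h => h, by trivial⟩

-- the four-neighbour expansion -----------------------------------------------

theorem expand_eq (n m : Int) (M : List (List Int)) (x y : Int) :
    expand n m M x y =
      upd n m (upd n m (upd n m (upd n m (M, []) (x + (-1)) (y + 0)) (x + 1) (y + 0))
        (x + 0) (y + (-1))) (x + 0) (y + 1) := by
  rfl

theorem expand_main (M0 : List (List Int)) (N K : Nat) (F : Int → Int → Prop)
    (M : List (List Int)) (x y : Int) (rest : List (Int × Int))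
    (hD : Dims N K M) (hS : Sound M0 N K M)
    (hQ : QOk N K M ((x, y) :: rest))
    (hFr : Front M0 N K F M ((x, y) :: rest)) :
    Dims N K (expand (N : Int) (K : Int) M x y).1 ∧
    Sound M0 N K (expand (N : Int) (K : Int) M x y).1 ∧
    QOk N K (expand (N : Int) (K : Int) M x y).1
      (rest ++ (expand (N : Int) (K : Int) M x y).2) ∧
    Front M0 N K F (expand (N : Int) (K : Int) M x y).1
      (rest ++ (expand (N : Int) (K : Int) M x y).2) ∧
    zcount (expand (N : Int) (K : Int) M x y).1 +
      (expand (N : Int) (K : Int) M x y).2.length = zcount M := by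
  obtain ⟨hxy, h2⟩ := hQ (x, y) (List.mem_cons_self ..)
  have hQr : QOk N K M (rest ++ ([] : List (Int × Int))) := by
    intro c hc
    apply hQ
    simp only [List.append_nil] at hc
    exact List.mem_cons_of_mem _ hc
  have hreach : Reach M0 N K x y := by
    rcases hS x y hxy with h | ⟨_, _, hr⟩
    · exact Reach.seed x y hxy (by rw [← h]; exact h2)
    · exact hr
  have hFr0 : ∀ a b : Int, inB N K a b → gget M a b = 2 →
      (a, b) ∈ rest ++ ([] : List (Int × Int)) ∨ Expd N K M a b ∨
      (gget M0 a b = 2 ∧ F a b) ∨ (a = x ∧ b = y) := by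
    intro a b hab hg
    rcases hFr a b hab hg with hm | he | hrest
    · simp only [List.mem_cons] at hm
      rcases hm with hm | hm
      · right; right; right; exact ⟨congrArg Prod.fst hm, congrArg Prod.snd hm⟩
      · left; simpa using hm
    · right; left; exact he
    · right; right; left; exact hrest
  have H1 := upd_main M0 N K F x y (x + (-1)) (y + 0) M [] rest
    (Or.inl ⟨rfl, rfl⟩) hreach hD hS hQr hFr0
  obtain ⟨d1, s1, q1, f1, t1, z1, w1, c1⟩ := H1
  have H2 := upd_main M0 N K F x y (x + 1) (y + 0)
    (upd (N:Int) (K:Int) (M, []) (x + (-1)) (y + 0)).1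
    (upd (N:Int) (K:Int) (M, []) (x + (-1)) (y + 0)).2 rest
    (Or.inr (Or.inl ⟨rfl, rfl⟩)) hreach d1 s1 q1 f1
  obtain ⟨d2, s2, q2, f2, t2, z2, w2, c2⟩ := H2
  have H3 := upd_main M0 N K F x y (x + 0) (y + (-1))
    (upd (N:Int) (K:Int) (upd (N:Int) (K:Int) (M, []) (x + (-1)) (y + 0)) (x + 1) (y + 0)).1
    (upd (N:Int) (K:Int) (upd (N:Int) (K:Int) (M, []) (x + (-1)) (y + 0)) (x + 1) (y + 0)).2 rest
    (Or.inr (Or.inr (Or.inl ⟨rfl, rfl⟩))) hreach d2 s2 q2 f2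
  obtain ⟨d3, s3, q3, f3, t3, z3, w3, c3⟩ := H3
  have H4 := upd_main M0 N K F x y (x + 0) (y + 1)
    (upd (N:Int) (K:Int) (upd (N:Int) (K:Int) (upd (N:Int) (K:Int) (M, []) (x + (-1)) (y + 0)) (x + 1) (y + 0)) (x + 0) (y + (-1))).1
    (upd (N:Int) (K:Int) (upd (N:Int) (K:Int) (upd (N:Int) (K:Int) (M, []) (x + (-1)) (y + 0)) (x + 1) (y + 0)) (x + 0) (y + (-1))).2 rest
    (Or.inr (Or.inr (Or.inr ⟨rfl, rfl⟩))) hreach d3 s3 q3 f3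
  obtain ⟨d4, s4, q4, f4, t4, z4, w4, c4⟩ := H4
  rw [expand_eq]
  have hx2fin : gget (upd (N:Int) (K:Int) (upd (N:Int) (K:Int) (upd (N:Int) (K:Int) (upd (N:Int) (K:Int) (M, []) (x + (-1)) (y + 0)) (x + 1) (y + 0)) (x + 0) (y + (-1))) (x + 0) (y + 1)).1 x y = 2 := by
    have hx0 : 0 ≤ x := hxy.1
    have hy0 : 0 ≤ y := hxy.2.2.1
    exact w4 x y hx0 hy0 (w3 x y hx0 hy0 (w2 x y hx0 hy0 (w1 x y hx0 hy0 h2)))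
  have hexpd : Expd N K (upd (N:Int) (K:Int) (upd (N:Int) (K:Int) (upd (N:Int) (K:Int) (upd (N:Int) (K:Int) (M, []) (x + (-1)) (y + 0)) (x + 1) (y + 0)) (x + 0) (y + (-1))) (x + 0) (y + 1)).1 x y := by
    intro na nb hadj hb
    have hna : 0 ≤ na := hb.1
    have hnb : 0 ≤ nb := hb.2.2.1
    rcases hadj with ⟨e1, e2⟩ | ⟨e1, e2⟩ | ⟨e1, e2⟩ | ⟨e1, e2⟩
    · subst e1; subst e2
      exact z4 _ _ hna hnb (z3 _ _ hna hnb (z2 _ _ hna hnb (t1 hb)))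
    · subst e1; subst e2
      exact z4 _ _ hna hnb (z3 _ _ hna hnb (t2 hb))
    · subst e1; subst e2
      exact z4 _ _ hna hnb (t3 hb)
    · subst e1; subst e2
      exact t4 hb
  refine ⟨d4, s4, q4, ?_, by simpa using c4.trans (c3.trans (c2.trans (by simpa using c1)))⟩
  intro a b hab hg
  rcases f4 a b hab hg with hm | he | hrest | hxy'
  · left; exact hm
  · right; left; exact he
  · right; right; exact hrest
  · obtain ⟨e1, e2⟩ := hxy'; subst e1; subst e2
    right; left; exact hexpd

-- the while-loop -------------------------------------------------------------

theorem bfs_main (M0 : List (List Int)) (N K : Nat) (F : Int → Int → Prop) :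
    ∀ (fuel : Nat) (M : List (List Int)) (q : List (Int × Int)),
      Dims N K M → Sound M0 N K M → QOk N K M q → Front M0 N K F M q →
      zcount M + q.length ≤ fuel →
      Dims N K (bfsRun (N : Int) (K : Int) fuel M q) ∧
      Sound M0 N K (bfsRun (N : Int) (K : Int) fuel M q) ∧
      (∀ x y : Int, inB N K x y → gget (bfsRun (N : Int) (K : Int) fuel M q) x y = 2 →
        Expd N K (bfsRun (N : Int) (K : Int) fuel M q) x y ∨ (gget M0 x y = 2 ∧ F x y)) := by
  intro fuel
  induction fuel with
  | zero =>
    intro M q hD hS hQ hFr hfuel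
    have hq : q = [] := by
      cases q with
      | nil => rfl
      | cons c q => simp at hfuel
    subst hq
    refine ⟨hD, hS, ?_⟩
    intro a b hab hg
    rcases hFr a b hab hg with hm | he | hrest
    · simp at hm
    · exact Or.inl he
    · exact Or.inr hrest
  | succ f IH =>
    intro M q hD hS hQ hFr hfuel
    cases q with
    | nil =>
      refine ⟨hD, hS, ?_⟩
      intro a b hab hg
      rcases hFr a b hab hg with hm | he | hrest
      · simp at hm
      · exact Or.inl he
      · exact Or.inr hrest
    | cons c q =>
      obtain ⟨x, y⟩ := c
      have hE := expand_main M0 N K F M x y q hD hS hQ hFr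
      obtain ⟨d, s, qk, fr, zc⟩ := hE
      have hfuel' : zcount (expand (N:Int) (K:Int) M x y).1 +
          (q ++ (expand (N:Int) (K:Int) M x y).2).length ≤ f := by
        simp only [List.length_append]
        simp only [List.length_cons] at hfuel
        omega
      have := IH (expand (N:Int) (K:Int) M x y).1 (q ++ (expand (N:Int) (K:Int) M x y).2)
        d s qk fr hfuel'
      simpa [bfsRun] using this

-- closed + sound characterise the result -------------------------------------

theorem reach_two (M0 : List (List Int)) (N K : Nat) (M' : List (List Int))
    (hS : Sound M0 N K M')
    (hC : ∀ x y : Int, inB N K x y → gget M' x y = 2 → Expd N K M' x y) :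
    ∀ x y : Int, Reach M0 N K x y → gget M' x y = 2 := by
  intro x y hr
  induction hr with
  | seed a b hb h2 =>
    rcases hS a b hb with h | ⟨_, h, _⟩
    · rw [h]; exact h2
    · exact h
  | step a b na nb hr hadj hb h0 ih =>
    have hab := reach_inB M0 N K a b hr
    have hexp := hC a b hab ih
    have hnz := hexp na nb hadj hb
    rcases hS na nb hb with h | ⟨_, h, _⟩
    · exact absurd (h.trans h0) hnz
    · exact h

theorem not_reach_eq (M0 : List (List Int)) (N K : Nat) (M' : List (List Int))
    (hS : Sound M0 N K M') (x y : Int) (hb : inB N K x y)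
    (hnr : ¬ Reach M0 N K x y) : gget M' x y = gget M0 x y := by
  rcases hS x y hb with h | ⟨_, _, hr⟩
  · exact h
  · exact absurd hr hnr

-- the frame: the evolving matrix keeps the original row structure and all columns past K
def Frame (K : Nat) (M0 M : List (List Int)) : Prop :=
  M.length = M0.length ∧
  (∀ (i : Nat) (h1 : i < M.length) (h2 : i < M0.length), (M[i]'h1).length = (M0[i]'h2).length) ∧
  (∀ x y : Int, 0 ≤ x → (K : Int) ≤ y → gget M x y = gget M0 x y)

theorem frame_refl (K : Nat) (M0 : List (List Int)) : Frame K M0 M0 :=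
  ⟨rfl, fun _ _ _ => rfl, fun _ _ _ _ => rfl⟩

theorem frame_gset (K : Nat) (M0 M : List (List Int)) (x y v : Int)
    (hf : Frame K M0 M) (hx0 : 0 ≤ x) (hy0 : 0 ≤ y) (hyK : y < (K : Int))
    (hxl : x.toNat < M.length) (hyl : y.toNat < (M.getD x.toNat []).length) :
    Frame K M0 (gset M x y v) := by
  obtain ⟨h1, h2, h3⟩ := hf
  refine ⟨by simpa [gset] using h1, ?_, ?_⟩
  · intro i hi1 hi2
    unfold gset at hi1 ⊢
    rw [List.getElem_set]
    split
    · next heq =>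
      subst heq
      rw [List.length_set]
      have hrow : M.getD x.toNat [] = M[x.toNat]'hxl := by
        rw [List.getD_eq_getElem?_getD, List.getElem?_eq_getElem hxl]; rfl
      rw [hrow]
      exact h2 x.toNat hxl hi2
    · next hne =>
      exact h2 i (by simpa using hi1) hi2
  · intro a b ha hb
    have hb0 : 0 ≤ b := le_trans (Int.natCast_nonneg K) hb
    rw [gget_gset M x y v a b hx0 hy0 ha hb0 hxl hyl]
    have hne : ¬(a = x ∧ b = y) := by rintro ⟨_, rfl⟩; omega
    rw [if_neg hne]
    exact h3 a b ha hb

theorem foldl_pres {α β : Type} (P : α → Prop) (f : α → β → α) :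
    ∀ (l : List β), (∀ s x, x ∈ l → P s → P (f s x)) → ∀ s, P s → P (l.foldl f s) := by
  intro l
  induction l with
  | nil => intro _ s h; simpa using h
  | cons a l ih =>
    intro hstep s h
    rw [List.foldl_cons]
    exact ih (fun s x hx hs => hstep s x (List.mem_cons_of_mem _ hx) hs) _
      (hstep s a (List.mem_cons_self ..) h)

theorem frame_upd (M0 : List (List Int)) (N K : Nat)
    (acc : List (List Int) × List (Int × Int)) (nx ny : Int)
    (h : Dims N K acc.1 ∧ Frame K M0 acc.1) :
    Dims N K (upd (N : Int) (K : Int) acc nx ny).1 ∧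
    Frame K M0 (upd (N : Int) (K : Int) acc nx ny).1 := by
  unfold upd
  by_cases hg : nx < 0 ∨ ny < 0 ∨ (N : Int) ≤ nx ∨ (K : Int) ≤ ny
  · simp only [if_pos hg]; exact h
  · simp only [if_neg hg]
    by_cases h0 : gget acc.1 nx ny = 0
    · simp only [if_pos h0]
      have hinB : inB N K nx ny := by unfold inB; omega
      obtain ⟨hxl, hyl⟩ := dims_bounds N K acc.1 nx ny h.1 hinB
      exact ⟨dims_gset N K acc.1 nx ny 2 h.1,
        frame_gset K M0 acc.1 nx ny 2 h.2 hinB.1 hinB.2.2.1 hinB.2.2.2 hxl hyl⟩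
    · simp only [if_neg h0]; exact h

theorem grid_eq (N K : Nat) (M0 M1 M2 : List (List Int))
    (d1 : Dims N K M1)
    (f1 : Frame K M0 M1) (f2 : Frame K M0 M2)
    (h : ∀ x y : Int, inB N K x y → gget M1 x y = gget M2 x y) : M1 = M2 := by
  have hlen : M1.length = M2.length := f1.1.trans f2.1.symm
  apply List.ext_getElem hlen
  intro i hi1 hi2
  have hi0 : i < M0.length := f1.1 ▸ hi1
  have hrl : (M1[i]'hi1).length = (M2[i]'hi2).length :=
    (f1.2.1 i hi1 hi0).trans (f2.2.1 i hi2 hi0).symm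
  apply List.ext_getElem hrl
  intro j hj1 hj2
  by_cases hjK : j < K
  · have hb : inB N K (i : Int) (j : Int) := by
      unfold inB
      have : i < N := d1.1 ▸ hi1
      omega
    have := h (i : Int) (j : Int) hb
    rwa [gget_eq_getElem M1 (i : Int) (j : Int) (by simpa using hi1) (by simpa using hj1),
      gget_eq_getElem M2 (i : Int) (j : Int) (by simpa using hi2) (by simpa using hj2)] at this
  · have e1 := f1.2.2 (i : Int) (j : Int) (Int.natCast_nonneg i) (by omega)
    have e2 := f2.2.2 (i : Int) (j : Int) (Int.natCast_nonneg i) (by omega)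
    have := e1.trans e2.symm
    rwa [gget_eq_getElem M1 (i : Int) (j : Int) (by simpa using hi1) (by simpa using hj1),
      gget_eq_getElem M2 (i : Int) (j : Int) (by simpa using hi2) (by simpa using hj2)] at this

-- A-side: the nested scan ----------------------------------------------------

def FA (i j x y : Int) : Prop := i < x ∨ (i = x ∧ j ≤ y)

def AInv (M0 : List (List Int)) (N K : Nat) (i j : Int) (M : List (List Int)) : Prop :=
  Dims N K M ∧ Sound M0 N K M ∧
  ∀ x y : Int, inB N K x y → gget M x y = 2 →
    Expd N K M x y ∨ (gget M0 x y = 2 ∧ FA i j x y)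

theorem body_step (M0 : List (List Int)) (N K : Nat) (i j : Int)
    (hi : 0 ≤ i ∧ i < (N : Int)) (hj : 0 ≤ j ∧ j < (K : Int))
    (h : AInv M0 N K i j M) :
    AInv M0 N K i (j + 1)
      (if gget M i j = 2 then bfsRun (N : Int) (K : Int) (zcount M + 2) M [(i, j)] else M) := by
  obtain ⟨hD, hS, hI⟩ := h
  by_cases h2 : gget M i j = 2
  · rw [if_pos h2]
    have hb : inB N K i j := by unfold inB; omega
    have hQ : QOk N K M [(i, j)] := by
      intro c hc; simp only [List.mem_singleton] at hc; subst hc; exact ⟨hb, h2⟩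
    have hFr : Front M0 N K (FA i (j + 1)) M [(i, j)] := by
      intro a b hab hg
      rcases hI a b hab hg with he | ⟨hm0, hfa⟩
      · exact Or.inr (Or.inl he)
      · by_cases hc : a = i ∧ b = j
        · left; simp [hc.1, hc.2]
        · right; right
          refine ⟨hm0, ?_⟩
          unfold FA at hfa ⊢
          rcases hfa with h | ⟨he, hle⟩
          · exact Or.inl h
          · right; constructor
            · exact he
            · by_cases hbj : b = j
              · exact absurd ⟨he.symm, hbj⟩ hc
              · omega
    have := bfs_main M0 N K (FA i (j + 1)) (zcount M + 2) M [(i, j)] hD hS hQ hFr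
      (by simp)
    exact ⟨this.1, this.2.1, this.2.2⟩
  · rw [if_neg h2]
    refine ⟨hD, hS, ?_⟩
    intro a b hab hg
    rcases hI a b hab hg with he | ⟨hm0, hfa⟩
    · exact Or.inl he
    · right
      refine ⟨hm0, ?_⟩
      unfold FA at hfa ⊢
      by_cases hc : a = i ∧ b = j
      · rw [hc.1, hc.2] at hg; exact absurd hg h2
      · rcases hfa with h | ⟨he, hle⟩
        · exact Or.inl h
        · right; constructor
          · exact he
          · by_cases hbj : b = j
            · exact absurd ⟨he.symm, hbj⟩ hc
            · omega

theorem row_fold (M0 : List (List Int)) (N K : Nat) (i : Int)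
    (hi0 : 0 ≤ i) (hiN : i < (N : Int)) :
    ∀ (t : Nat) (j : Int) (M : List (List Int)), ((K : Int) - j).toNat = t → 0 ≤ j →
      AInv M0 N K i j M →
      AInv M0 N K (i + 1) 0
        ((PySem.List.pyRange j (K : Int) 1).foldl
          (fun M j => if gget M i j = 2 then bfsRun (N : Int) (K : Int) (zcount M + 2) M [(i, j)] else M) M) := by
  intro t
  induction t using Nat.strong_induction_on with
  | _ t IHt =>
    intro j M ht hj0 hinv
    by_cases hjK : (K : Int) ≤ j
    · rw [PySem.List.pyRange_one_eq_nil hjK]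
      obtain ⟨hD, hS, hI⟩ := hinv
      refine ⟨hD, hS, ?_⟩
      intro a b hab hg
      rcases hI a b hab hg with he | ⟨hm0, hfa⟩
      · exact Or.inl he
      · right
        refine ⟨hm0, ?_⟩
        unfold FA at hfa ⊢
        unfold inB at hab
        omega
    · rw [show PySem.List.pyRange j (K : Int) 1 = j :: PySem.List.pyRange (j + 1) (K : Int) 1
        from PySem.List.pyRange_one_cons (by omega), List.foldl_cons]
      have hstep := body_step M0 N K i j ⟨hi0, hiN⟩ ⟨hj0, by omega⟩ hinv
      exact IHt (((K : Int) - (j + 1)).toNat) (by omega) (j + 1) _ rfl (by omega) hstep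

theorem outer_fold (M0 : List (List Int)) (N K : Nat) :
    ∀ (t : Nat) (i : Int) (M : List (List Int)), ((N : Int) - i).toNat = t → 0 ≤ i →
      AInv M0 N K i 0 M →
      AInv M0 N K (N : Int) 0
        ((PySem.List.pyRange i (N : Int) 1).foldl
          (fun M i => (PySem.List.pyRange 0 (K : Int) 1).foldl
            (fun M j => if gget M i j = 2 then bfsRun (N : Int) (K : Int) (zcount M + 2) M [(i, j)] else M) M) M) := by
  intro t
  induction t using Nat.strong_induction_on with
  | _ t IHt =>
    intro i M ht hi0 hinv
    by_cases hiN : (N : Int) ≤ i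
    · rw [PySem.List.pyRange_one_eq_nil hiN]
      obtain ⟨hD, hS, hI⟩ := hinv
      refine ⟨hD, hS, ?_⟩
      intro a b hab hg
      rcases hI a b hab hg with he | ⟨hm0, hfa⟩
      · exact Or.inl he
      · right
        refine ⟨hm0, ?_⟩
        unfold FA at hfa ⊢
        unfold inB at hab
        omega
    · rw [show PySem.List.pyRange i (N : Int) 1 = i :: PySem.List.pyRange (i + 1) (N : Int) 1
        from PySem.List.pyRange_one_cons (by omega), List.foldl_cons]
      have hrow := row_fold M0 N K i hi0 (by omega) ((K : Int) - 0).toNat 0 M rfl le_rfl hinv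
      exact IHt (((N : Int) - (i + 1)).toNat) (by omega) (i + 1) _ rfl (by omega) hrow

-- B-side: the fixed-point sweeps ---------------------------------------------

-- (x, y) has an in-bounds 2-neighbour in M
def Nbr (N K : Nat) (M : List (List Int)) (x y : Int) : Prop :=
  ∃ nx ny : Int, Adjc x y nx ny ∧ inB N K nx ny ∧ gget M nx ny = 2

-- cellStep's guard, for an in-bounds cell, is exactly 'is 0 and has a 2-neighbour'
theorem cond_iff_nbr (N K : Nat) (M : List (List Int)) (i j : Int)
    (hb : inB N K i j) :
    ((0 < i ∧ gget M (i - 1) j = 2) ∨ (i + 1 < (N : Int) ∧ gget M (i + 1) j = 2) ∨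
     (0 < j ∧ gget M i (j - 1) = 2) ∨ (j + 1 < (K : Int) ∧ gget M i (j + 1) = 2)) ↔
    Nbr N K M i j := by
  obtain ⟨b1, b2, b3, b4⟩ := hb
  constructor
  · rintro (⟨h1, h2⟩ | ⟨h1, h2⟩ | ⟨h1, h2⟩ | ⟨h1, h2⟩)
    · exact ⟨i - 1, j, Or.inl ⟨by omega, by omega⟩, by unfold inB; omega, h2⟩
    · exact ⟨i + 1, j, Or.inr (Or.inl ⟨by omega, by omega⟩), by unfold inB; omega, h2⟩
    · exact ⟨i, j - 1, Or.inr (Or.inr (Or.inl ⟨by omega, by omega⟩)), by unfold inB; omega, h2⟩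
    · exact ⟨i, j + 1, Or.inr (Or.inr (Or.inr ⟨by omega, by omega⟩)), by unfold inB; omega, h2⟩
  · rintro ⟨nx, ny, hadj, hbn, h2⟩
    obtain ⟨c1, c2, c3, c4⟩ := hbn
    rcases hadj with ⟨e1, e2⟩ | ⟨e1, e2⟩ | ⟨e1, e2⟩ | ⟨e1, e2⟩
    · left; subst e1; subst e2
      exact ⟨by omega, by simpa [show i + -1 = i - 1 by ring, show j + 0 = j by ring] using h2⟩
    · right; left; subst e1; subst e2
      exact ⟨by omega, by simpa [show j + 0 = j by ring] using h2⟩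
    · right; right; left; subst e1; subst e2
      exact ⟨by omega, by simpa [show i + 0 = i by ring, show j + -1 = j - 1 by ring] using h2⟩
    · right; right; right; subst e1; subst e2
      exact ⟨by omega, by simpa [show i + 0 = i by ring] using h2⟩

-- cells processed before position (i, j) of a sweep (row-major order)
def Done (i j x y : Int) : Prop := x < i ∨ (x = i ∧ y < j)

-- the sweep invariant: Ms is the matrix the sweep started from
def SInv (M0 Ms : List (List Int)) (N K : Nat) (i j : Int)
    (s : List (List Int) × Bool) : Prop :=
  Dims N K s.1 ∧ Sound M0 N K s.1 ∧
  zcount s.1 ≤ zcount Ms ∧ (s.2 = true → zcount s.1 < zcount Ms) ∧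
  (s.2 = false → s.1 = Ms ∧
    ∀ x y : Int, inB N K x y → Done i j x y →
      ¬(gget Ms x y = 0 ∧ Nbr N K Ms x y))

theorem cell_step (M0 Ms : List (List Int)) (N K : Nat) (i j : Int)
    (s : List (List Int) × Bool)
    (hi : 0 ≤ i ∧ i < (N : Int)) (hj : 0 ≤ j ∧ j < (K : Int))
    (h : SInv M0 Ms N K i j s) :
    SInv M0 Ms N K i (j + 1) (cellStep (N : Int) (K : Int) s i j) := by
  obtain ⟨hD, hS, hz1, hz2, hf⟩ := h
  have hb : inB N K i j := by unfold inB; omega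
  unfold cellStep
  by_cases hc : gget s.1 i j = 0 ∧
      ((0 < i ∧ gget s.1 (i - 1) j = 2) ∨ (i + 1 < (N : Int) ∧ gget s.1 (i + 1) j = 2) ∨
       (0 < j ∧ gget s.1 i (j - 1) = 2) ∨ (j + 1 < (K : Int) ∧ gget s.1 i (j + 1) = 2))
  · rw [if_pos hc]
    obtain ⟨h0, hcond⟩ := hc
    obtain ⟨nx, ny, hadj, hbn, h2n⟩ := (cond_iff_nbr N K s.1 i j hb).mp hcond
    -- the neighbour is reachable, hence so is (i, j)
    have hreachN : Reach M0 N K nx ny := by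
      rcases hS nx ny hbn with h | ⟨_, _, hr⟩
      · exact Reach.seed nx ny hbn (by rw [← h]; exact h2n)
      · exact hr
    have hM0z : gget M0 i j = 0 := by
      rcases hS i j hb with h | ⟨_, h2, _⟩
      · rw [← h]; exact h0
      · exact absurd h2 (by rw [h0]; decide)
    have hreach : Reach M0 N K i j :=
      Reach.step nx ny i j hreachN (adjc_symm i j nx ny hadj) hb hM0z
    have hself : gget (gset s.1 i j 2) i j = 2 := gget_gset_self N K s.1 i j 2 hD hb
    have hzc := zcount_gset N K s.1 i j hD hb h0
    refine ⟨dims_gset N K s.1 i j 2 hD, ?_,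
      by show zcount (gset s.1 i j 2) ≤ zcount Ms; omega,
      fun _ => by show zcount (gset s.1 i j 2) < zcount Ms; omega, by simp⟩
    intro a b hab
    by_cases hab' : a = i ∧ b = j
    · obtain ⟨e1, e2⟩ := hab'; subst e1; subst e2
      exact Or.inr ⟨hM0z, hself, hreach⟩
    · rw [gget_gset_ne N K s.1 i j 2 a b hD hb (by exact hab.1)
        (by exact hab.2.2.1) hab']
      exact hS a b hab
  · rw [if_neg hc]
    refine ⟨hD, hS, hz1, hz2, ?_⟩
    intro hfalse
    obtain ⟨heq, hdone⟩ := hf hfalse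
    refine ⟨heq, ?_⟩
    intro x y hxy hd
    by_cases hcur : x = i ∧ y = j
    · obtain ⟨e1, e2⟩ := hcur; subst e1; subst e2
      rintro ⟨hz, hn⟩
      apply hc
      rw [heq]
      exact ⟨hz, (cond_iff_nbr N K Ms x y hxy).mpr hn⟩
    · apply hdone x y hxy
      unfold Done at hd ⊢
      omega

theorem sweep_row (M0 Ms : List (List Int)) (N K : Nat) (i : Int)
    (hi0 : 0 ≤ i) (hiN : i < (N : Int)) :
    ∀ (t : Nat) (j : Int) (s : List (List Int) × Bool),
      ((K : Int) - j).toNat = t → 0 ≤ j → SInv M0 Ms N K i j s →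
      SInv M0 Ms N K (i + 1) 0
        ((PySem.List.pyRange j (K : Int) 1).foldl
          (fun s j => cellStep (N : Int) (K : Int) s i j) s) := by
  intro t
  induction t using Nat.strong_induction_on with
  | _ t IHt =>
    intro j s ht hj0 hinv
    by_cases hjK : (K : Int) ≤ j
    · rw [PySem.List.pyRange_one_eq_nil hjK]
      obtain ⟨hD, hS, hz1, hz2, hf⟩ := hinv
      refine ⟨hD, hS, hz1, hz2, ?_⟩
      intro hfalse
      obtain ⟨heq, hdone⟩ := hf hfalse
      refine ⟨heq, ?_⟩
      intro x y hxy hd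
      apply hdone x y hxy
      unfold Done at hd ⊢
      unfold inB at hxy
      omega
    · rw [show PySem.List.pyRange j (K : Int) 1 = j :: PySem.List.pyRange (j + 1) (K : Int) 1
        from PySem.List.pyRange_one_cons (by omega), List.foldl_cons]
      have hstep := cell_step M0 Ms N K i j s ⟨hi0, hiN⟩ ⟨hj0, by omega⟩ hinv
      exact IHt (((K : Int) - (j + 1)).toNat) (by omega) (j + 1) _ rfl (by omega) hstep

theorem sweep_outer (M0 Ms : List (List Int)) (N K : Nat) :
    ∀ (t : Nat) (i : Int) (s : List (List Int) × Bool),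
      ((N : Int) - i).toNat = t → 0 ≤ i → SInv M0 Ms N K i 0 s →
      SInv M0 Ms N K (N : Int) 0
        ((PySem.List.pyRange i (N : Int) 1).foldl
          (fun s i => (PySem.List.pyRange 0 (K : Int) 1).foldl
            (fun s j => cellStep (N : Int) (K : Int) s i j) s) s) := by
  intro t
  induction t using Nat.strong_induction_on with
  | _ t IHt =>
    intro i s ht hi0 hinv
    by_cases hiN : (N : Int) ≤ i
    · rw [PySem.List.pyRange_one_eq_nil hiN]
      obtain ⟨hD, hS, hz1, hz2, hf⟩ := hinv
      refine ⟨hD, hS, hz1, hz2, ?_⟩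
      intro hfalse
      obtain ⟨heq, hdone⟩ := hf hfalse
      refine ⟨heq, ?_⟩
      intro x y hxy hd
      apply hdone x y hxy
      unfold Done at hd ⊢
      unfold inB at hxy
      omega
    · rw [show PySem.List.pyRange i (N : Int) 1 = i :: PySem.List.pyRange (i + 1) (N : Int) 1
        from PySem.List.pyRange_one_cons (by omega), List.foldl_cons]
      have hrow := sweep_row M0 Ms N K i hi0 (by omega) ((K : Int) - 0).toNat 0 s rfl le_rfl hinv
      exact IHt (((N : Int) - (i + 1)).toNat) (by omega) (i + 1) _ rfl (by omega) hrow

theorem sweep_main (M0 Ms : List (List Int)) (N K : Nat)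
    (hD : Dims N K Ms) (hS : Sound M0 N K Ms) :
    Dims N K (sweep (N : Int) (K : Int) Ms).1 ∧
    Sound M0 N K (sweep (N : Int) (K : Int) Ms).1 ∧
    ((sweep (N : Int) (K : Int) Ms).2 = true →
      zcount (sweep (N : Int) (K : Int) Ms).1 < zcount Ms) ∧
    ((sweep (N : Int) (K : Int) Ms).2 = false →
      (sweep (N : Int) (K : Int) Ms).1 = Ms ∧
      ∀ x y : Int, inB N K x y → ¬(gget Ms x y = 0 ∧ Nbr N K Ms x y)) := by
  have hstart : SInv M0 Ms N K 0 0 (Ms, false) := by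
    refine ⟨hD, hS, le_rfl, by simp, fun _ => ⟨rfl, ?_⟩⟩
    intro x y hxy hd
    unfold Done at hd
    unfold inB at hxy
    omega
  have hend := sweep_outer M0 Ms N K (((N : Int) - 0).toNat) 0 (Ms, false) rfl le_rfl hstart
  obtain ⟨hD', hS', hz1, hz2, hf⟩ := hend
  refine ⟨hD', hS', hz2, ?_⟩
  intro hfalse
  obtain ⟨heq, hdone⟩ := hf hfalse
  refine ⟨heq, ?_⟩
  intro x y hxy
  apply hdone x y hxy
  unfold Done
  unfold inB at hxy
  omega

theorem fix_main (M0 : List (List Int)) (N K : Nat) :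
    ∀ (fuel : Nat) (M : List (List Int)),
      Dims N K M → Sound M0 N K M → zcount M < fuel →
      Dims N K (fixLoop (N : Int) (K : Int) fuel M) ∧
      Sound M0 N K (fixLoop (N : Int) (K : Int) fuel M) ∧
      (∀ x y : Int, inB N K x y → gget (fixLoop (N : Int) (K : Int) fuel M) x y = 2 →
        Expd N K (fixLoop (N : Int) (K : Int) fuel M) x y) := by
  intro fuel
  induction fuel with
  | zero => intro M _ _ hfuel; omega
  | succ f IH =>
    intro M hD hS hfuel
    have hsw := sweep_main M0 M N K hD hS
    obtain ⟨d, s, hch, hst⟩ := hsw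
    by_cases hb : (sweep (N : Int) (K : Int) M).2 = true
    · have hz := hch hb
      have := IH (sweep (N : Int) (K : Int) M).1 d s (by omega)
      simpa [fixLoop, hb] using this
    · have hb' : (sweep (N : Int) (K : Int) M).2 = false := by
        cases h : (sweep (N : Int) (K : Int) M).2
        · rfl
        · exact absurd h hb
      obtain ⟨heq, hcl⟩ := hst hb'
      have hres : fixLoop (N : Int) (K : Int) (f + 1) M = M := by
        simp [fixLoop, hb']
      rw [hres]
      refine ⟨hD, hS, ?_⟩
      intro x y hxy h2 nx ny hadj hbn hz
      exact hcl nx ny hbn ⟨hz, x, y, adjc_symm x y nx ny hadj, hxy, h2⟩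

-- assembling both ports ------------------------------------------------------

theorem pre_dims (matrix : List (List Int)) (hpre : Pre_do_spread matrix) :
    Dims matrix.length (matrix.getD 0 []).length matrix := by
  obtain ⟨hne, hrow⟩ := hpre
  have hhead : matrix.headD [] = matrix.getD 0 [] := by
    cases matrix with
    | nil => rfl
    | cons hd tl => rfl
  refine ⟨rfl, ?_⟩
  intro i h
  have := hrow (matrix[i]'h) (List.getElem_mem h)
  rw [hhead] at this
  exact this

theorem frame_expand (M0 : List (List Int)) (N K : Nat) (M : List (List Int)) (x y : Int)
    (h : Dims N K M ∧ Frame K M0 M) :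
    Dims N K (expand (N : Int) (K : Int) M x y).1 ∧
    Frame K M0 (expand (N : Int) (K : Int) M x y).1 := by
  rw [expand_eq]
  exact frame_upd M0 N K _ _ _ (frame_upd M0 N K _ _ _ (frame_upd M0 N K _ _ _
    (frame_upd M0 N K (M, []) _ _ h)))

theorem frame_bfs (M0 : List (List Int)) (N K : Nat) :
    ∀ (fuel : Nat) (M : List (List Int)) (q : List (Int × Int)),
      Dims N K M ∧ Frame K M0 M →
      Dims N K (bfsRun (N : Int) (K : Int) fuel M q) ∧
      Frame K M0 (bfsRun (N : Int) (K : Int) fuel M q) := by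
  intro fuel
  induction fuel with
  | zero => intro M q h; simpa [bfsRun] using h
  | succ f IH =>
    intro M q h
    cases q with
    | nil => simpa [bfsRun] using h
    | cons c q =>
      have hE := frame_expand M0 N K M c.1 c.2 h
      have := IH (expand (N : Int) (K : Int) M c.1 c.2).1
        (q ++ (expand (N : Int) (K : Int) M c.1 c.2).2) hE
      simpa [bfsRun] using this

theorem frame_A (matrix : List (List Int))
    (hD : Dims matrix.length (matrix.getD 0 []).length matrix) :
    Dims matrix.length (matrix.getD 0 []).length (do_spread matrix) ∧
    Frame (matrix.getD 0 []).length matrix (do_spread matrix) := by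
  unfold do_spread
  apply foldl_pres (fun M => Dims matrix.length (matrix.getD 0 []).length M ∧
    Frame (matrix.getD 0 []).length matrix M) _ _ ?_ matrix
    ⟨hD, frame_refl _ _⟩
  intro M i _ h
  apply foldl_pres (fun M => Dims matrix.length (matrix.getD 0 []).length M ∧
    Frame (matrix.getD 0 []).length matrix M) _ _ ?_ M h
  intro M j _ h
  by_cases h2 : gget M i j = 2
  · rw [if_pos h2]
    exact frame_bfs matrix matrix.length (matrix.getD 0 []).length _ M [(i, j)] h
  · rw [if_neg h2]; exact h

theorem frame_cell (M0 : List (List Int)) (N K : Nat)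
    (s : List (List Int) × Bool) (i j : Int)
    (hi : 0 ≤ i ∧ i < (N : Int)) (hj : 0 ≤ j ∧ j < (K : Int))
    (h : Dims N K s.1 ∧ Frame K M0 s.1) :
    Dims N K (cellStep (N : Int) (K : Int) s i j).1 ∧
    Frame K M0 (cellStep (N : Int) (K : Int) s i j).1 := by
  unfold cellStep
  split
  · next hc =>
    have hb : inB N K i j := by unfold inB; omega
    obtain ⟨hxl, hyl⟩ := dims_bounds N K s.1 i j h.1 hb
    exact ⟨dims_gset N K s.1 i j 2 h.1,
      frame_gset K M0 s.1 i j 2 h.2 hb.1 hb.2.2.1 hb.2.2.2 hxl hyl⟩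
  · next => exact h

theorem frame_sweep (M0 : List (List Int)) (N K : Nat) (M : List (List Int))
    (h : Dims N K M ∧ Frame K M0 M) :
    Dims N K (sweep (N : Int) (K : Int) M).1 ∧
    Frame K M0 (sweep (N : Int) (K : Int) M).1 := by
  unfold sweep
  apply foldl_pres (fun s => Dims N K s.1 ∧ Frame K M0 s.1) _ _ ?_ (M, false) h
  intro s i hi hs
  rw [PySem.List.mem_pyRange_one] at hi
  apply foldl_pres (fun s => Dims N K s.1 ∧ Frame K M0 s.1) _ _ ?_ s hs
  intro s j hj hs
  rw [PySem.List.mem_pyRange_one] at hj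
  exact frame_cell M0 N K s i j hi hj hs

theorem frame_fix (M0 : List (List Int)) (N K : Nat) :
    ∀ (fuel : Nat) (M : List (List Int)), Dims N K M ∧ Frame K M0 M →
      Dims N K (fixLoop (N : Int) (K : Int) fuel M) ∧
      Frame K M0 (fixLoop (N : Int) (K : Int) fuel M) := by
  intro fuel
  induction fuel with
  | zero => intro M h; simpa [fixLoop] using h
  | succ f IH =>
    intro M h
    by_cases hb : (sweep (N : Int) (K : Int) M).2 = true
    · have := IH (sweep (N : Int) (K : Int) M).1 (frame_sweep M0 N K M h)
      simpa [fixLoop, hb] using this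
    · have hb' : (sweep (N : Int) (K : Int) M).2 = false := by
        cases h' : (sweep (N : Int) (K : Int) M).2
        · rfl
        · exact absurd h' hb
      simpa [fixLoop, hb'] using h

theorem frame_B (matrix : List (List Int))
    (hD : Dims matrix.length (matrix.getD 0 []).length matrix) :
    Dims matrix.length (matrix.getD 0 []).length (do_spread_alt matrix) ∧
    Frame (matrix.getD 0 []).length matrix (do_spread_alt matrix) := by
  unfold do_spread_alt
  exact frame_fix matrix matrix.length (matrix.getD 0 []).length (zcount matrix + 1) matrix
    ⟨hD, frame_refl _ _⟩

theorem a_closed (matrix : List (List Int)) (hpre : Pre_do_spread matrix) :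
    Dims matrix.length (matrix.getD 0 []).length (do_spread matrix) ∧
    Sound matrix matrix.length (matrix.getD 0 []).length (do_spread matrix) ∧
    (∀ x y : Int, inB matrix.length (matrix.getD 0 []).length x y →
      gget (do_spread matrix) x y = 2 →
      Expd matrix.length (matrix.getD 0 []).length (do_spread matrix) x y) := by
  have hD := pre_dims matrix hpre
  have hstart : AInv matrix matrix.length (matrix.getD 0 []).length 0 0 matrix := by
    refine ⟨hD, fun _ _ _ => Or.inl rfl, ?_⟩
    intro a b hab hg
    right
    refine ⟨hg, ?_⟩
    unfold FA; unfold inB at hab; omega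
  have hend := outer_fold matrix matrix.length (matrix.getD 0 []).length
    (((matrix.length : Int) - 0).toNat) 0 matrix rfl le_rfl hstart
  obtain ⟨hD', hS', hI'⟩ := hend
  refine ⟨hD', hS', ?_⟩
  · intro x y hb hg
    rcases hI' x y hb hg with he | ⟨_, hfa⟩
    · exact he
    · exfalso; unfold FA at hfa; unfold inB at hb; omega
  

theorem b_closed (matrix : List (List Int)) (hpre : Pre_do_spread matrix) :
    Dims matrix.length (matrix.getD 0 []).length (do_spread_alt matrix) ∧
    Sound matrix matrix.length (matrix.getD 0 []).length (do_spread_alt matrix) ∧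
    (∀ x y : Int, inB matrix.length (matrix.getD 0 []).length x y →
      gget (do_spread_alt matrix) x y = 2 →
      Expd matrix.length (matrix.getD 0 []).length (do_spread_alt matrix) x y) := by
  have hD := pre_dims matrix hpre
  have := fix_main matrix matrix.length (matrix.getD 0 []).length
    (zcount matrix + 1) matrix hD (fun _ _ _ => Or.inl rfl) (by omega)
  exact this

-- ===== VERDICT (by name: the statement is the Claim_ definition above) =====
theorem do_spread_spec : Claim_equal_do_spread := by
  intro matrix _ hpre
  unfold Spec_do_spread
  have hD := pre_dims matrix hpre
  have hA := a_closed matrix hpre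
  have hB := b_closed matrix hpre
  apply grid_eq matrix.length (matrix.getD 0 []).length matrix _ _ hA.1
    (frame_A matrix hD).2 (frame_B matrix hD).2
  intro x y hb
  by_cases hr : Reach matrix matrix.length (matrix.getD 0 []).length x y
  · rw [reach_two _ _ _ _ hA.2.1 hA.2.2 x y hr, reach_two _ _ _ _ hB.2.1 hB.2.2 x y hr]
  · rw [not_reach_eq _ _ _ _ hA.2.1 x y hb hr, not_reach_eq _ _ _ _ hB.2.1 x y hb hr]
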